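-- pv_equiv track=rewrite | github.com/FatOtter/lingshu-round2 | backend/src/lingshu/function/workflows/engine.py | compute_safety_level
-- ===== SOURCE A (Python) =====
-- SAFETY_LEVEL_ORDER: dict[str, int] = {
--     "SAFETY_READ_ONLY": 0,
--     "SAFETY_IDEMPOTENT_WRITE": 1,
--     "SAFETY_NON_IDEMPOTENT": 2,
--     "SAFETY_CRITICAL": 3,
-- }
--
-- SAFETY_LEVELS_BY_RANK = {v: k for k, v in SAFETY_LEVEL_ORDER.items()}
--
-- def compute_safety_level(
--     node_safety_levels: list[str],
-- ) -> str:
--     """Return the highest safety level among all nodes."""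
--     if not node_safety_levels:
--         return "SAFETY_READ_ONLY"
--     max_rank = max(
--         SAFETY_LEVEL_ORDER.get(lvl, 0) for lvl in node_safety_levels
--     )
--     return SAFETY_LEVELS_BY_RANK.get(max_rank, "SAFETY_READ_ONLY")
-- ===== SOURCE B (Python) =====
-- def compute_safety_level(node_safety_levels):
--     present = set(node_safety_levels)
--     for lvl in ("SAFETY_CRITICAL", "SAFETY_NON_IDEMPOTENT", "SAFETY_IDEMPOTENT_WRITE"):
--         if lvl in present:
--             return lvl
--     return "SAFETY_READ_ONLY"
-- ===== Notes on version B (the rewrite author's own statement) =====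
-- stated objective: simpler
-- what changed: Instead of mapping every node to a numeric rank, taking the max and mapping the rank back through a reverse dict, B scans the three non-default levels in priority order and returns the first one present in the input set, defaulting to SAFETY_READ_ONLY.
import Mathlib
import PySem

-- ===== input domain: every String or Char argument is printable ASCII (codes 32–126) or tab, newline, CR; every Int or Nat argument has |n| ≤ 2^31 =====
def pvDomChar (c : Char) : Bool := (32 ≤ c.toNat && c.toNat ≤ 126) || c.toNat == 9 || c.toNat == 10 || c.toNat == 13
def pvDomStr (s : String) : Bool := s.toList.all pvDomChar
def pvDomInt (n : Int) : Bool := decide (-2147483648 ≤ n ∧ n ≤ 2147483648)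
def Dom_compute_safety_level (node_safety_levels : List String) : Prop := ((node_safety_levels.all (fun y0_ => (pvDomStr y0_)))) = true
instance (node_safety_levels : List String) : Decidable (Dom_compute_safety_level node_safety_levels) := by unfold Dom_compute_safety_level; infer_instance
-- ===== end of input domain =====

-- B replaces rank-max-then-reverse-lookup with a first-match scan over the levels in priority order (simpler decomposition; same O(n) cost).

-- ===== PORT A =====
def SAFETY_LEVEL_ORDER : PySem.Dict String Int :=
  PySem.Dict.ofList [("SAFETY_READ_ONLY", 0), ("SAFETY_IDEMPOTENT_WRITE", 1),
                     ("SAFETY_NON_IDEMPOTENT", 2), ("SAFETY_CRITICAL", 3)]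

-- {v: k for k, v in SAFETY_LEVEL_ORDER.items()}
def SAFETY_LEVELS_BY_RANK : PySem.Dict Int String :=
  SAFETY_LEVEL_ORDER.items.foldl (fun d kv => d.insert kv.2 kv.1) PySem.Dict.empty

def compute_safety_level (node_safety_levels : List String) : String :=
  match node_safety_levels with
  | [] => "SAFETY_READ_ONLY"
  | h :: t =>
    -- max over the nonempty generator, folded left from the first element
    let max_rank := t.foldl (fun acc lvl => max acc (SAFETY_LEVEL_ORDER.getD lvl 0))
                            (SAFETY_LEVEL_ORDER.getD h 0)
    SAFETY_LEVELS_BY_RANK.getD max_rank "SAFETY_READ_ONLY"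

-- ===== PORT B =====
def compute_safety_level_alt (node_safety_levels : List String) : String :=
  let present := PySem.Set.ofList node_safety_levels
  match ["SAFETY_CRITICAL", "SAFETY_NON_IDEMPOTENT", "SAFETY_IDEMPOTENT_WRITE"].find?
          (fun lvl => present.contains lvl) with
  | some lvl => lvl
  | none => "SAFETY_READ_ONLY"

-- ===== PRECONDITION & SPEC =====
def Spec_compute_safety_level (node_safety_levels : List String) (out : String) : Prop := out = compute_safety_level_alt node_safety_levels
instance (node_safety_levels : List String) (out : String) : Decidable (Spec_compute_safety_level node_safety_levels out) := by unfold Spec_compute_safety_level; infer_instance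

-- ===== CLAIM (what is proved, stated in full; the proofs are below) =====
def Claim_equal_compute_safety_level : Prop := ∀ (node_safety_levels : List String), Dom_compute_safety_level node_safety_levels → Spec_compute_safety_level node_safety_levels (compute_safety_level node_safety_levels)

-- ===== LEMMAS AND PROOFS =====

def pvRank (s : String) : Int := SAFETY_LEVEL_ORDER.getD s 0

lemma pvRank_eq (s : String) :
    pvRank s = if s = "SAFETY_READ_ONLY" then 0
      else if s = "SAFETY_IDEMPOTENT_WRITE" then 1
      else if s = "SAFETY_NON_IDEMPOTENT" then 2
      else if s = "SAFETY_CRITICAL" then 3 else 0 := by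
  simp only [pvRank, SAFETY_LEVEL_ORDER, PySem.Dict.ofList, PySem.Dict.update, List.foldl,
    PySem.Dict.getD_insert, PySem.Dict.getD_empty]
  split_ifs <;> simp_all

lemma pvRank_bounds (s : String) : 0 ≤ pvRank s ∧ pvRank s ≤ 3 := by
  rw [pvRank_eq]; split_ifs <;> omega

-- the max rank of a list, right fold (pvG (h :: t) = max (pvRank h) (pvG t) by rfl)
def pvG (xs : List String) : Int := xs.foldr (fun x m => max (pvRank x) m) 0

lemma pvG_bounds (xs : List String) : 0 ≤ pvG xs ∧ pvG xs ≤ 3 := by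
  induction xs with
  | nil => simp [pvG]
  | cons h t ih =>
    have hb := pvRank_bounds h
    have hg : pvG (h :: t) = max (pvRank h) (pvG t) := rfl
    omega

lemma pvFold_eq (t : List String) : ∀ a : Int, 0 ≤ a →
    t.foldl (fun acc lvl => max acc (SAFETY_LEVEL_ORDER.getD lvl 0)) a = max a (pvG t) := by
  induction t with
  | nil => intro a ha; simp [pvG]; omega
  | cons h t ih =>
    intro a ha
    have h0 := (pvRank_bounds h).1
    have := ih (max a (pvRank h)) (by omega)
    simp only [List.foldl, pvG, List.foldr] at *
    rw [show SAFETY_LEVEL_ORDER.getD h 0 = pvRank h from rfl, this]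
    omega

lemma pvG_char (xs : List String) :
    (("SAFETY_CRITICAL" ∈ xs → pvG xs = 3) ∧
     ("SAFETY_CRITICAL" ∉ xs → "SAFETY_NON_IDEMPOTENT" ∈ xs → pvG xs = 2) ∧
     ("SAFETY_CRITICAL" ∉ xs → "SAFETY_NON_IDEMPOTENT" ∉ xs → "SAFETY_IDEMPOTENT_WRITE" ∈ xs → pvG xs = 1) ∧
     ("SAFETY_CRITICAL" ∉ xs → "SAFETY_NON_IDEMPOTENT" ∉ xs → "SAFETY_IDEMPOTENT_WRITE" ∉ xs → pvG xs = 0)) := by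
  induction xs with
  | nil => simp [pvG]
  | cons h t ih =>
    obtain ⟨i1, i2, i3, i4⟩ := ih
    have hg : pvG (h :: t) = max (pvRank h) (pvG t) := rfl
    have hr := pvRank_eq h
    have r3 : pvRank "SAFETY_CRITICAL" = 3 := by rw [pvRank_eq]; decide
    have r2 : pvRank "SAFETY_NON_IDEMPOTENT" = 2 := by rw [pvRank_eq]; decide
    have r1 : pvRank "SAFETY_IDEMPOTENT_WRITE" = 1 := by rw [pvRank_eq]; decide
    have hGt : ∀ (hc : "SAFETY_CRITICAL" ∉ t), pvG t ≤ 2 := by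
      intro hc
      by_cases h2 : "SAFETY_NON_IDEMPOTENT" ∈ t
      · rw [i2 hc h2] <;> omega
      · by_cases hw : "SAFETY_IDEMPOTENT_WRITE" ∈ t
        · rw [i3 hc h2 hw] <;> omega
        · rw [i4 hc h2 hw] <;> omega
    have hGt1 : ∀ (hc : "SAFETY_CRITICAL" ∉ t) (hn : "SAFETY_NON_IDEMPOTENT" ∉ t), pvG t ≤ 1 := by
      intro hc hn
      by_cases hw : "SAFETY_IDEMPOTENT_WRITE" ∈ t
      · rw [i3 hc hn hw] <;> omega
      · rw [i4 hc hn hw] <;> norm_num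
    refine ⟨?_, ?_, ?_, ?_⟩ <;> simp only [List.mem_cons, not_or] <;> rw [hg]
    · rintro (rfl | hm)
      · have := pvG_bounds t; rw [r3]; omega
      · rw [i1 hm]; have := pvRank_bounds h; omega
    · rintro ⟨hne, hnc⟩ (rfl | hm)
      · have := hGt hnc; rw [r2]; omega
      · rw [i2 hnc hm, hr]
        split_ifs <;> first | omega | simp_all
    · rintro ⟨hnec, hncrit⟩ ⟨hnen, hnnon⟩ (rfl | hm)
      · have := hGt1 hncrit hnnon; rw [r1]; omega
      · rw [i3 hncrit hnnon hm, hr]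
        split_ifs <;> first | omega | simp_all
    · rintro ⟨hc1, hc2⟩ ⟨hn1, hn2⟩ ⟨hw1, hw2⟩
      rw [i4 hc2 hn2 hw2, hr]
      split_ifs <;> first | omega | simp_all

-- B unfolded to nested membership tests
lemma alt_eq (xs : List String) :
    compute_safety_level_alt xs =
      if "SAFETY_CRITICAL" ∈ xs then "SAFETY_CRITICAL"
      else if "SAFETY_NON_IDEMPOTENT" ∈ xs then "SAFETY_NON_IDEMPOTENT"
      else if "SAFETY_IDEMPOTENT_WRITE" ∈ xs then "SAFETY_IDEMPOTENT_WRITE"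
      else "SAFETY_READ_ONLY" := by
  simp only [compute_safety_level_alt, List.find?]
  by_cases h3 : "SAFETY_CRITICAL" ∈ xs <;>
  by_cases h2 : "SAFETY_NON_IDEMPOTENT" ∈ xs <;>
  by_cases h1 : "SAFETY_IDEMPOTENT_WRITE" ∈ xs <;>
  simp [PySem.Set.contains, PySem.Set.mem_ofList, h1, h2, h3]

lemma byRank_getD :
    SAFETY_LEVELS_BY_RANK.getD 0 "SAFETY_READ_ONLY" = "SAFETY_READ_ONLY" ∧
    SAFETY_LEVELS_BY_RANK.getD 1 "SAFETY_READ_ONLY" = "SAFETY_IDEMPOTENT_WRITE" ∧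
    SAFETY_LEVELS_BY_RANK.getD 2 "SAFETY_READ_ONLY" = "SAFETY_NON_IDEMPOTENT" ∧
    SAFETY_LEVELS_BY_RANK.getD 3 "SAFETY_READ_ONLY" = "SAFETY_CRITICAL" := by
  decide

-- ===== VERDICT (by name: the statement is the Claim_ definition above) =====
theorem compute_safety_level_spec : Claim_equal_compute_safety_level := by
  intro xs _
  unfold Spec_compute_safety_level
  rw [alt_eq]
  obtain ⟨g3, g2, g1, g0⟩ := pvG_char xs
  obtain ⟨r0, r1, r2, r3⟩ := byRank_getD
  match xs with
  | [] => simp [compute_safety_level]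
  | h :: t =>
    have h0 : (0:Int) ≤ pvRank h := by rw [pvRank_eq]; split_ifs <;> norm_num
    have hA : compute_safety_level (h :: t) =
        SAFETY_LEVELS_BY_RANK.getD (pvG (h :: t)) "SAFETY_READ_ONLY" := by
      simp only [compute_safety_level]
      rw [show SAFETY_LEVEL_ORDER.getD h 0 = pvRank h from rfl, pvFold_eq t (pvRank h) h0]
      rfl
    rw [hA]
    by_cases m3 : "SAFETY_CRITICAL" ∈ h :: t
    · rw [g3 m3, r3, if_pos m3]
    · rw [if_neg m3]
      by_cases m2 : "SAFETY_NON_IDEMPOTENT" ∈ h :: t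
      · rw [g2 m3 m2, r2, if_pos m2]
      · rw [if_neg m2]
        by_cases m1 : "SAFETY_IDEMPOTENT_WRITE" ∈ h :: t
        · rw [g1 m3 m2 m1, r1, if_pos m1]
        · rw [if_neg m1, g0 m3 m2 m1, r0]
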